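-- pv_equiv track=rewrite | github.com/Movazed/ProblemSets-Contests | Bcardgame.py | count_suneet_wins
-- ===== SOURCE A (Python) =====
-- def count_suneet_wins(test_cases):
--     results = []
--     for case in test_cases:
--         a1, a2, b1, b2 = case
--         # Store the results of each combination
--         suneet_wins = 0
--
--         # (a1 vs b1, a2 vs b2)
--         suneet_rounds = (a1 > b1) + (a2 > b2)
--         slavic_rounds = (a1 < b1) + (a2 < b2)
--         if suneet_rounds > slavic_rounds:
--             suneet_wins += 1
--
--         # (a1 vs b2, a2 vs b1)
--         suneet_rounds = (a1 > b2) + (a2 > b1)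
--         slavic_rounds = (a1 < b2) + (a2 < b1)
--         if suneet_rounds > slavic_rounds:
--             suneet_wins += 1
--
--         # (a2 vs b1, a1 vs b2)
--         suneet_rounds = (a2 > b1) + (a1 > b2)
--         slavic_rounds = (a2 < b1) + (a1 < b2)
--         if suneet_rounds > slavic_rounds:
--             suneet_wins += 1
--
--         # (a2 vs b2, a1 vs b1)
--         suneet_rounds = (a2 > b2) + (a1 > b1)
--         slavic_rounds = (a2 < b2) + (a1 < b1)
--         if suneet_rounds > slavic_rounds:
--             suneet_wins += 1
--
--         results.append(suneet_wins)
--     return results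
-- ===== SOURCE B (Python) =====
-- def count_suneet_wins(test_cases):
--     # Decision rule on sorted hands: sort each player's two cards; a same-rank
--     # matchup (high-vs-high, low-vs-low) is won iff Suneet is ahead on one rank
--     # and not behind on the other, and a cross matchup iff his low card already
--     # ties-or-beats Slavic's high card; each matchup occurs in two deal orders,
--     # hence the +2s.  No rounds are simulated and no arrangements enumerated.
--     results = []
--     for a1, a2, b1, b2 in test_cases:
--         hi_s, lo_s = (a1, a2) if a1 >= a2 else (a2, a1)
--         hi_v, lo_v = (b1, b2) if b1 >= b2 else (b2, b1)
--         wins = 0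
--         if (hi_s > hi_v and lo_s >= lo_v) or (lo_s > lo_v and hi_s >= hi_v):
--             wins += 2
--         if hi_s > lo_v and lo_s >= hi_v:
--             wins += 2
--         results.append(wins)
--     return results
-- ===== Notes on version B (the rewrite author's own statement) =====
-- stated objective: alternative
-- what changed: Instead of simulating rounds for the four deal arrangements, B sorts each hand and applies a closed-form order rule: the same-rank matchup wins iff Suneet leads on one rank and does not trail on the other, the cross matchup iff his low card ties-or-beats Slavic's high card; each matchup counts twice.
import Mathlib
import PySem

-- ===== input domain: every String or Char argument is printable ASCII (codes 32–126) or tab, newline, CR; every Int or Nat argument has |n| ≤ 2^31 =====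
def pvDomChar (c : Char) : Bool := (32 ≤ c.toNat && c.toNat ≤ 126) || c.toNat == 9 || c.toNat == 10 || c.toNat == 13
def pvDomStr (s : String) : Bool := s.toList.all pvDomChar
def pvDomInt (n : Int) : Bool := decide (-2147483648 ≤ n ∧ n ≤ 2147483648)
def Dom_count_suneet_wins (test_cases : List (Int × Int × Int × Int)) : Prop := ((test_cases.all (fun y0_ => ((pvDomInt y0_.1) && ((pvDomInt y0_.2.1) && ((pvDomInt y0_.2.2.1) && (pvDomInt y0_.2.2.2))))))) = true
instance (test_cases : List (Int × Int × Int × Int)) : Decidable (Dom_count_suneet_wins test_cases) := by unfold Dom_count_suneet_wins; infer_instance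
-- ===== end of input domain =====

-- B replaces A's four simulated deal arrangements by a closed-form order rule on the sorted hands (alternative decomposition; return-value equivalence).

-- ===== PORT A =====
-- per-case body of A's loop: the four unrolled arrangement blocks
def pvCaseA (c : Int × Int × Int × Int) : Int :=
  let (a1, a2, b1, b2) := c
  let w0 : Int := 0
  let w1 := if ((if a1 > b1 then (1:Int) else 0) + (if a2 > b2 then (1:Int) else 0)) >
               ((if a1 < b1 then (1:Int) else 0) + (if a2 < b2 then (1:Int) else 0)) then w0 + 1 else w0
  let w2 := if ((if a1 > b2 then (1:Int) else 0) + (if a2 > b1 then (1:Int) else 0)) >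
               ((if a1 < b2 then (1:Int) else 0) + (if a2 < b1 then (1:Int) else 0)) then w1 + 1 else w1
  let w3 := if ((if a2 > b1 then (1:Int) else 0) + (if a1 > b2 then (1:Int) else 0)) >
               ((if a2 < b1 then (1:Int) else 0) + (if a1 < b2 then (1:Int) else 0)) then w2 + 1 else w2
  let w4 := if ((if a2 > b2 then (1:Int) else 0) + (if a1 > b1 then (1:Int) else 0)) >
               ((if a2 < b2 then (1:Int) else 0) + (if a1 < b1 then (1:Int) else 0)) then w3 + 1 else w3
  w4

def count_suneet_wins (test_cases : List (Int × Int × Int × Int)) : List Int :=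
  test_cases.foldl (fun results c => results ++ [pvCaseA c]) []

-- ===== PORT B =====
-- per-case body of B's loop: sort each hand, apply the order rule
def pvCaseB (c : Int × Int × Int × Int) : Int :=
  let (a1, a2, b1, b2) := c
  let hs := if a1 ≥ a2 then a1 else a2
  let ls := if a1 ≥ a2 then a2 else a1
  let hv := if b1 ≥ b2 then b1 else b2
  let lv := if b1 ≥ b2 then b2 else b1
  let w0 : Int := 0
  let w1 := if (hs > hv ∧ ls ≥ lv) ∨ (ls > lv ∧ hs ≥ hv) then w0 + 2 else w0
  let w2 := if hs > lv ∧ ls ≥ hv then w1 + 2 else w1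
  w2

def count_suneet_wins_alt (test_cases : List (Int × Int × Int × Int)) : List Int :=
  test_cases.foldl (fun results c => results ++ [pvCaseB c]) []

-- ===== PRECONDITION & SPEC =====
def Spec_count_suneet_wins (test_cases : List (Int × Int × Int × Int)) (out : List Int) : Prop := out = count_suneet_wins_alt test_cases
instance (test_cases : List (Int × Int × Int × Int)) (out : List Int) : Decidable (Spec_count_suneet_wins test_cases out) := by unfold Spec_count_suneet_wins; infer_instance

-- ===== CLAIM =====
def Claim_equal_count_suneet_wins : Prop := ∀ (test_cases : List (Int × Int × Int × Int)), Dom_count_suneet_wins test_cases → Spec_count_suneet_wins test_cases (count_suneet_wins test_cases)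

-- ===== LEMMAS AND PROOFS =====
theorem pvFoldlAppendMap (f : Int × Int × Int × Int → Int) (l : List (Int × Int × Int × Int)) (acc : List Int) :
    l.foldl (fun results c => results ++ [f c]) acc = acc ++ l.map f := by
  induction l generalizing acc with
  | nil => simp
  | cons x xs ih => simp [List.foldl, ih]

theorem pvGtTest (x y u v : Int) :
    (((if x > y then (1:Int) else 0) + (if u > v then (1:Int) else 0)) >
     ((if x < y then (1:Int) else 0) + (if u < v then (1:Int) else 0))) ↔
    ((x > y ∧ ¬ u < v) ∨ (u > v ∧ ¬ x < y)) := by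
  by_cases h1 : x > y <;> by_cases h2 : u > v <;>
    by_cases h3 : x < y <;> by_cases h4 : u < v <;>
    simp [h1, h2, h3, h4] <;> omega

set_option maxHeartbeats 2000000 in
theorem pvCaseEq (c : Int × Int × Int × Int) : pvCaseA c = pvCaseB c := by
  obtain ⟨a1, a2, b1, b2⟩ := c
  show pvCaseA (a1, a2, b1, b2) = pvCaseB (a1, a2, b1, b2)
  unfold pvCaseA pvCaseB
  simp only [← gt_iff_lt, pvGtTest]
  split_ifs <;> omega

-- ===== VERDICT =====
theorem count_suneet_wins_spec : Claim_equal_count_suneet_wins := by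
  intro tc _
  unfold Spec_count_suneet_wins count_suneet_wins count_suneet_wins_alt
  rw [pvFoldlAppendMap, pvFoldlAppendMap]
  exact congrArg _ (List.map_congr_left fun c _ => pvCaseEq c)
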